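-- pv_equiv track=rewrite | github.com/KoMinjae/codingtest | 2번.py | solution
-- ===== SOURCE A (Python) =====
-- def change(number, base):
--     note = '01234'
--     q, r= divmod(number, base)
--     n = note[r]
--     return change(q,base) + n if q else n
--
-- def solution(n):
--     answer=0
--     numlist =list()
--     i=1
--     count=1
--     while len(numlist)!=n:
--         num = change(i,3)
--         if '2' not in num:
--             numlist.append(change(i,3))
--         i+=1
--     for i in range(len(numlist[-1])-1,-1,-1):
--         answer+=int((numlist[-1][i]))*count
--         count=count*3
--     return answer
-- ===== SOURCE B (Python) =====
-- def solution(n):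
--     # n-th positive integer whose base-3 digits are all 0 or 1:
--     # write n in binary and read those bits as base-3 digits.
--     if n <= 0:
--         return 0
--     return 3 * solution(n // 2) + n % 2
-- ===== Notes on version B (the rewrite author's own statement) =====
-- stated objective: faster
-- what changed: A generates candidates 1,2,3,... via base-3 string conversion, filters out those containing digit 2 until it has n of them, then re-parses the last string; B computes the n-th such number directly by reading n's binary digits as base-3 digits.
-- crash fix: On n = 0 A raises IndexError (numlist[-1] on an empty list); B returns 0. — e.g. on solution(0): A raises IndexError, B returns 0
import Mathlib
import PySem

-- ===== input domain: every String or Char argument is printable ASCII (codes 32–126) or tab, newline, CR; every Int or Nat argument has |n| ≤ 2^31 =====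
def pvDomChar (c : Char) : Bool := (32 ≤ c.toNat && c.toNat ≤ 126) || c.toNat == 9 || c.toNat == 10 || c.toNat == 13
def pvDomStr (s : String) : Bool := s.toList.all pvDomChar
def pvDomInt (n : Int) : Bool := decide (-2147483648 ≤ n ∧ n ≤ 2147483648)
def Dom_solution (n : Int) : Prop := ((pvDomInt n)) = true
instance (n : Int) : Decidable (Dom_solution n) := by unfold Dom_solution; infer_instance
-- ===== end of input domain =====

-- B replaces A's generate-and-filter search (base-3 strings without digit '2') by reading n's
-- binary digits as base-3 digits; equivalence of return values is proved for n ≥ 1.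

-- ===== PORT A =====
-- change(number, base): fuel = number.natAbs + 1 steps always suffice for number ≥ 0 (a mere totality guard).
def change (fuel : Nat) (number base : Int) : List Char :=
  match fuel with
  | 0 => []  -- fuel exhausted: unreachable at the call sites admitted by Pre_
  | fuel + 1 =>
    match PySem.Int.divmod? number base with
    | none => []  -- ZeroDivisionError: base = 3 at every call site
    | some (q, r) =>
      let c := (PySem.List.pyGet? ("01234".toList) r).getD ' '  -- note[r]; r ∈ [0,3) here, never IndexError
      if q ≠ 0 then change fuel q base ++ [c] else [c]

-- the while-loop of solution; fuel is a mere totality guard (proved sufficient for n ≥ 1 below)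
def loopA (n : Int) : Nat → Int → List (List Char) → List (List Char)
  | 0, _, numlist => numlist  -- fuel exhausted: unreachable on the inputs admitted by Pre_
  | fuel + 1, i, numlist =>
    if (numlist.length : Int) ≠ n then
      let num := change (i.natAbs + 1) i 3
      let numlist' := if PySem.Chars.isIn ['2'] num = false
                      then numlist ++ [change (i.natAbs + 1) i 3] else numlist
      loopA n fuel (i + 1) numlist'
    else numlist

def solution (n : Int) : Int :=
  let numlist := loopA n (3 * n * n + 4).toNat 1 []
  let last := (PySem.List.pyGet? numlist (-1)).getD []  -- numlist[-1]: IndexError iff numlist = [] (n ≤ 0, outside Pre_)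
  ((PySem.List.pyRange ((last.length : Int) - 1) (-1) (-1)).foldl
    (fun (st : Int × Int) i =>
      (st.1 + ((PySem.Int.ofChars? [(PySem.List.pyGet? last i).getD ' ']).getD 0) * st.2,
       st.2 * 3))
    (0, 1)).1

-- ===== PORT B =====
def solution_alt (n : Int) : Int :=
  if n ≤ 0 then 0
  else 3 * solution_alt (PySem.Int.floordiv n 2) + PySem.Int.mod n 2
termination_by n.toNat
decreasing_by
  rename_i h
  rw [PySem.Int.floordiv_eq_ediv_of_pos (by omega)]
  omega

-- ===== PRECONDITION & SPEC =====
-- Pre_ excludes n ≤ 0: A's while loop never terminates for n < 0, and at n = 0 numlist[-1] raises IndexError.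
def Pre_solution (n : Int) : Prop := 1 ≤ n
instance (n : Int) : Decidable (Pre_solution n) := by unfold Pre_solution; infer_instance
def pvWitness_solution : Int := (1)

-- On n = 0 A raises IndexError (numlist[-1] on the empty list); B returns 0.
def Raises_solution (n : Int) : Prop := n = 0
instance (n : Int) : Decidable (Raises_solution n) := by unfold Raises_solution; infer_instance
def pvRaiseWitness_solution : Int := (0)
def pvRaiseWitnessOut_solution : Int := 0

def Spec_solution (n : Int) (out : Int) : Prop := out = solution_alt n
instance (n : Int) (out : Int) : Decidable (Spec_solution n out) := by unfold Spec_solution; infer_instance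

-- ===== CLAIM (what is proved, stated in full; the proofs are below) =====
def Claim_equal_solution : Prop := ∀ (n : Int), Dom_solution n → Pre_solution n → Spec_solution n (solution n)
def Claim_raises_solution : Prop := (∀ (n : Int), Dom_solution n → Raises_solution n → ¬ Pre_solution n) ∧ (Dom_solution (pvRaiseWitness_solution) ∧ Raises_solution (pvRaiseWitness_solution) ∧ solution_alt (pvRaiseWitness_solution) = pvRaiseWitnessOut_solution)

-- ===== LEMMAS AND PROOFS =====

-- Nat model of B: n's binary digits read in base 3
def g : Nat → Nat
  | 0 => 0
  | m + 1 => 3 * g ((m + 1) / 2) + (m + 1) % 2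
decreasing_by omega

-- Nat model of change(m, 3)
def chg (m : Nat) : List Char :=
  if h : m / 3 = 0 then [['0','1','2','3','4'].getD (m % 3) ' ']
  else chg (m / 3) ++ [['0','1','2','3','4'].getD (m % 3) ' ']
decreasing_by omega

-- m has no digit 2 in base 3
def no2 : Nat → Bool
  | 0 => true
  | m + 1 => decide ((m + 1) % 3 ≠ 2) && no2 ((m + 1) / 3)
decreasing_by omega

-- inverse of g on the no2 numbers
def hinv : Nat → Nat
  | 0 => 0
  | m + 1 => 2 * hinv ((m + 1) / 3) + (m + 1) % 3
decreasing_by omega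

theorem g_unfold (m : Nat) (h : 0 < m) : g m = 3 * g (m / 2) + m % 2 := by
  cases m with
  | zero => omega
  | succ k => rw [g]

theorem g_zero : g 0 = 0 := by simp [g]

theorem alt_eq_g : ∀ N : Nat, solution_alt (N : Int) = (g N : Int) := by
  intro N
  induction N using Nat.strong_induction_on with
  | _ N ih =>
    cases N with
    | zero => simp [solution_alt, g]
    | succ k =>
      rw [solution_alt]
      have h0 : ¬ ((k + 1 : Nat) : Int) ≤ 0 := by push_cast; omega
      rw [if_neg h0]
      have hfd : PySem.Int.floordiv ((k + 1 : Nat) : Int) 2 = (((k + 1) / 2 : Nat) : Int) := by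
        exact_mod_cast PySem.Int.floordiv_natCast (k + 1) 2
      have hmod : PySem.Int.mod ((k + 1 : Nat) : Int) 2 = (((k + 1) % 2 : Nat) : Int) := by
        exact_mod_cast PySem.Int.mod_natCast (k + 1) 2
      rw [hfd, hmod, ih ((k + 1) / 2) (by omega), g]
      push_cast; ring

theorem g_mono : ∀ b a : Nat, a < b → g a < g b := by
  intro b
  induction b using Nat.strong_induction_on with
  | _ b ih =>
    intro a hab
    rw [g_unfold b (by omega)]
    by_cases ha : a = 0
    · subst ha
      rw [g_zero]
      rcases Nat.eq_zero_or_pos (b / 2) with h | h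
      · have hb1 : b % 2 = 1 := by omega
        omega
      · have h1 : g 0 < g (b / 2) := ih (b / 2) (by omega) 0 h
        rw [g_zero] at h1
        omega
    · rw [g_unfold a (by omega)]
      rcases Nat.lt_or_ge (a / 2) (b / 2) with h | h
      · have h1 : g (a / 2) < g (b / 2) := ih (b / 2) (by omega) (a / 2) h
        have h2 : a % 2 ≤ 1 := by omega
        omega
      · have heq : a / 2 = b / 2 := by omega
        have hpar : a % 2 = 0 ∧ b % 2 = 1 := by omega
        rw [heq]
        omega

theorem g_pos (k : Nat) (h : 0 < k) : 0 < g k := by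
  have := g_mono k 0 h
  rw [g_zero] at this
  exact this

theorem no2_g : ∀ k : Nat, no2 (g k) = true := by
  intro k
  induction k using Nat.strong_induction_on with
  | _ k ih =>
    cases k with
    | zero => simp [g, no2]
    | succ m =>
      have hg := g_unfold (m + 1) (by omega)
      have hmod : g (m + 1) % 3 = (m + 1) % 2 := by omega
      have hdiv : g (m + 1) / 3 = g ((m + 1) / 2) := by omega
      have hpos : 0 < g (m + 1) := g_pos (m + 1) (by omega)
      cases hk : g (m + 1) with
      | zero => omega
      | succ t =>
        rw [no2]
        have h1 : (t + 1) % 3 ≠ 2 := by rw [← hk, hmod]; omega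
        have h2 : no2 ((t + 1) / 3) = true := by
          rw [← hk, hdiv]; exact ih ((m + 1) / 2) (by omega)
        simp [h1, h2]

theorem g_hinv : ∀ m : Nat, no2 m = true → g (hinv m) = m := by
  intro m
  induction m using Nat.strong_induction_on with
  | _ m ih =>
    intro hm
    cases m with
    | zero => simp [hinv, g]
    | succ t =>
      rw [hinv]
      rw [no2] at hm
      simp only [Bool.and_eq_true, decide_eq_true_eq] at hm
      obtain ⟨h3, hrec⟩ := hm
      have hmod3 : (t + 1) % 3 ≤ 1 := by omega
      have hdiv : (2 * hinv ((t + 1) / 3) + (t + 1) % 3) / 2 = hinv ((t + 1) / 3) := by omega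
      have hmod : (2 * hinv ((t + 1) / 3) + (t + 1) % 3) % 2 = (t + 1) % 3 := by omega
      by_cases hz : 2 * hinv ((t + 1) / 3) + (t + 1) % 3 = 0
      · exfalso
        have hh : hinv ((t + 1) / 3) = 0 ∧ (t + 1) % 3 = 0 := by omega
        have hg := ih ((t + 1) / 3) (by omega) hrec
        rw [hh.1, g_zero] at hg
        omega
      · rw [g_unfold _ (by omega), hdiv, hmod, ih ((t + 1) / 3) (by omega) hrec]
        omega

theorem g_le_sq : ∀ m : Nat, g m ≤ 3 * m * m := by
  intro m
  induction m using Nat.strong_induction_on with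
  | _ m ih =>
    cases m with
    | zero => simp [g]
    | succ t =>
      rw [g]
      have h := ih ((t + 1) / 2) (by omega)
      rcases Nat.eq_zero_or_pos ((t + 1) / 2) with h0 | h0
      · have ht : t = 0 := by omega
        subst ht
        norm_num [g_zero]
      · have hle : 2 * ((t + 1) / 2) ≤ t + 1 := by omega
        have hsq : (2 * ((t + 1) / 2)) * (2 * ((t + 1) / 2)) ≤ (t + 1) * (t + 1) :=
          Nat.mul_le_mul hle hle
        have h1 : 1 ≤ ((t + 1) / 2) * ((t + 1) / 2) := Nat.one_le_iff_ne_zero.mpr (by positivity)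
        have hm : (t + 1) % 2 ≤ 1 := by omega
        nlinarith
-- change with enough fuel computes chg
theorem change_eq_chg : ∀ fuel m : Nat, m < fuel → change fuel (m : Int) 3 = chg m := by
  intro fuel
  induction fuel with
  | zero => omega
  | succ f ih =>
    intro m hm
    rw [change]
    have hdm : PySem.Int.divmod? (m : Int) 3 = some ((((m / 3 : Nat) : Int)), (((m % 3 : Nat) : Int))) := by
      simp [PySem.Int.divmod?]
      constructor
      · exact_mod_cast PySem.Int.floordiv_natCast m 3
      · exact_mod_cast PySem.Int.mod_natCast m 3
    rw [hdm]
    have hget : (PySem.List.pyGet? ("01234".toList) (((m % 3 : Nat) : Int))).getD ' '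
        = ['0','1','2','3','4'].getD (m % 3) ' ' := by
      rw [PySem.List.pyGet?_natCast]
      rfl
    rw [chg]
    by_cases hq : m / 3 = 0
    · simp only [hq, Nat.cast_zero, ne_eq, not_true_eq_false, reduceIte, dif_pos]
      rw [hget]
    · have hq' : ¬ (((m / 3 : Nat) : Int) = 0) := by exact_mod_cast hq
      simp only [ne_eq, hq', not_false_eq_true, reduceIte, dif_neg hq]
      rw [hget, ih (m / 3) (by omega)]

-- base-3 value of a digit string, and the digits chg produces
def val3 : List Char → Int := fun l => l.foldl (fun a c => 3 * a + (PySem.Int.ofChars? [c]).getD 0) 0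

theorem val3_append (l : List Char) (c : Char) :
    val3 (l ++ [c]) = 3 * val3 l + (PySem.Int.ofChars? [c]).getD 0 := by
  simp [val3]

theorem digit_val (r : Nat) (hr : r < 3) :
    (PySem.Int.ofChars? [['0','1','2','3','4'].getD r ' ']).getD 0 = (r : Int) := by
  interval_cases r <;> decide

theorem val3_chg : ∀ m : Nat, val3 (chg m) = (m : Int) := by
  intro m
  induction m using Nat.strong_induction_on with
  | _ m ih =>
    rw [chg]
    by_cases hq : m / 3 = 0
    · rw [dif_pos hq]
      have h1 : val3 [['0','1','2','3','4'].getD (m % 3) ' '] =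
          3 * 0 + (PySem.Int.ofChars? [['0','1','2','3','4'].getD (m % 3) ' ']).getD 0 := by
        simp [val3]
      rw [h1, digit_val (m % 3) (by omega)]
      push_cast
      omega
    · rw [dif_neg hq, val3_append, ih (m / 3) (by omega), digit_val (m % 3) (by omega)]
      push_cast
      omega

theorem two_mem_chg : ∀ m : Nat, ('2' ∈ chg m) ↔ no2 m = false := by
  intro m
  induction m using Nat.strong_induction_on with
  | _ m ih =>
    rw [chg]
    have hd2 : ('2' = ['0','1','2','3','4'].getD (m % 3) ' ') ↔ m % 3 = 2 := by
      have h3 : m % 3 < 3 := by omega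
      interval_cases h : m % 3 <;> simp
    by_cases hq : m / 3 = 0
    · rw [dif_pos hq]
      simp only [List.mem_singleton, hd2]
      cases m with
      | zero => simp [no2]
      | succ t =>
        rw [no2, hq]
        simp [no2]
    · rw [dif_neg hq]
      cases m with
      | zero => exfalso; simp at hq
      | succ t =>
        rw [no2]
        simp only [List.mem_append, List.mem_singleton, hd2, ih ((t + 1) / 3) (by omega),
          Bool.and_eq_false_iff, decide_eq_false_iff_not, not_not]
        tauto

theorem isIn_two_chg (m : Nat) :
    PySem.Chars.isIn ['2'] (chg m) = false ↔ no2 m = true := by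
  rw [PySem.Chars.isIn_eq_false_iff, List.singleton_infix_iff, two_mem_chg]
  simp

-- the tail of A's list after k elements have been collected
def tailFrom (N k : Nat) : List (List Char) :=
  if k < N then chg (g (k + 1)) :: tailFrom N (k + 1) else []
termination_by N - k

theorem loop_exit (n : Int) (fuel : Nat) (i : Int) (L : List (List Char))
    (h : (L.length : Int) = n) (hf : 0 < fuel) : loopA n fuel i L = L := by
  cases fuel with
  | zero => omega
  | succ f => rw [loopA]; simp [h]

theorem loop_main (N : Nat) : ∀ fuel k i L,
    k < N → g k < i → i ≤ g (k + 1) → L.length = k → g N + 2 ≤ fuel + i →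
    loopA (N : Int) fuel (i : Int) L = L ++ tailFrom N k := by
  intro fuel
  induction fuel with
  | zero =>
    intro k i L hk hgi hig hL hfuel
    exfalso
    have hle : g (k + 1) ≤ g N := by
      rcases Nat.lt_or_ge (k + 1) N with h | h
      · exact Nat.le_of_lt (g_mono N (k + 1) h)
      · have : k + 1 = N := by omega
        rw [this]
    omega
  | succ f ih =>
    intro k i L hk hgi hig hL hfuel
    rw [loopA]
    have hne : ¬ ((L.length : Int) = (N : Int)) := by rw [hL]; omega
    rw [if_pos hne]
    simp only [Int.natAbs_natCast]
    rw [change_eq_chg (i + 1) i (by omega)]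
    by_cases hgood : no2 i = true
    · rw [if_pos ((isIn_two_chg i).mpr hgood)]
      -- i is the next no-2 number, hence i = g (k + 1)
      obtain ⟨m, hm⟩ : ∃ m, g m = i := ⟨hinv i, g_hinv i hgood⟩
      have hmk : m = k + 1 := by
        have h1 : k < m := by
          by_contra hcon
          rcases Nat.lt_or_ge m k with h | h
          · have := g_mono k m h; omega
          · have hmke : m = k := by omega
            rw [hmke] at hm; omega
        have h2 : m ≤ k + 1 := by
          by_contra hcon
          have hmono : g (k + 1) < g m := g_mono m (k + 1) (by omega)
          omega
        omega
      have hi : i = g (k + 1) := by rw [← hmk, hm]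
      have hcast : ((i : Int) + 1) = ((i + 1 : Nat) : Int) := by push_cast; ring
      rw [hcast]
      rcases Nat.lt_or_ge (k + 1) N with hlt | hge
      · rw [ih (k + 1) (i + 1) (L ++ [chg i]) hlt (by omega)
          (by have := g_mono (k + 1 + 1) (k + 1) (by omega); omega)
          (by simp [hL]) (by omega)]
        rw [List.append_assoc]
        congr 1
        conv_rhs => rw [tailFrom]
        rw [if_pos hk, ← hi]
        rfl
      · have hkN : k + 1 = N := by omega
        have hiN : i = g N := by rw [hi, hkN]
        rw [loop_exit (N : Int) f ((i + 1 : Nat) : Int) (L ++ [chg i])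
          (by simp [hL, hkN]) (by omega)]
        rw [tailFrom, if_pos hk, ← hi, hkN, tailFrom, if_neg (by omega)]
    · have hbad : no2 i = false := by
        cases hno : no2 i with
        | false => rfl
        | true => exact absurd hno hgood
      rw [if_neg (by rw [isIn_two_chg]; simp [hbad])]
      have hilt : i < g (k + 1) := by
        rcases Nat.lt_or_ge i (g (k + 1)) with h | h
        · exact h
        · exfalso
          have hieq : i = g (k + 1) := by omega
          simp [hieq, no2_g] at hbad
      have hcast : ((i : Int) + 1) = ((i + 1 : Nat) : Int) := by push_cast; ring
      rw [hcast]
      exact ih k (i + 1) L hk (by omega) (by omega) hL (by omega)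

theorem tail_last (N : Nat) : ∀ d k, k + d + 1 = N →
    (tailFrom N k).getLast? = some (chg (g N)) := by
  intro d
  induction d with
  | zero =>
    intro k hk
    rw [tailFrom, if_pos (by omega), tailFrom, if_neg (by omega)]
    simp [show k + 1 = N by omega]
  | succ e ih =>
    intro k hk
    have h2 := ih (k + 1) (by omega)
    rw [tailFrom, if_pos (by omega)]
    rw [tailFrom, if_pos (by omega)]
    rw [List.getLast?_cons_cons]
    rw [tailFrom, if_pos (by omega)] at h2
    exact h2

theorem fold_val (l : List Char) : ∀ (k : Nat) (a c : Int), k ≤ l.length →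
    ((PySem.List.pyRange ((k : Int) - 1) (-1) (-1)).foldl
      (fun (st : Int × Int) i =>
        (st.1 + ((PySem.Int.ofChars? [(PySem.List.pyGet? l i).getD ' ']).getD 0) * st.2,
         st.2 * 3)) (a, c)).1
      = a + c * val3 (l.take k) := by
  intro k
  induction k with
  | zero =>
    intro a c _
    rw [show ((0 : Nat) : Int) - 1 = -1 by norm_num,
      PySem.List.pyRange_neg_one_eq_nil (by norm_num)]
    simp [val3]
  | succ k ihk =>
    intro a c hk
    rcases hxe : l[k]? with _ | x
    · rw [List.getElem?_eq_none_iff] at hxe; omega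
    rw [show ((k + 1 : Nat) : Int) - 1 = (k : Int) by push_cast; ring,
      PySem.List.pyRange_neg_one_cons (by omega)]
    rw [List.foldl_cons]
    have hget : PySem.List.pyGet? l ((k : Nat) : Int) = some x := by
      rw [PySem.List.pyGet?_natCast]; exact hxe
    rw [hget]
    have hrec := ihk (a + ((PySem.Int.ofChars? [x]).getD 0) * c) (c * 3) (by omega)
    simp only [Option.getD_some]
    rw [hrec]
    have htake : l.take (k + 1) = l.take k ++ [x] := by
      rw [List.take_add_one, hxe]
      rfl
    rw [htake, val3_append]
    ring

theorem solution_eq_gN (N : Nat) (hN : 1 ≤ N) : solution (N : Int) = (g N : Int) := by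
  have hfuel : (3 * (N : Int) * (N : Int) + 4).toNat = 3 * N * N + 4 := by
    have h : (3 * (N : Int) * (N : Int) + 4) = ((3 * N * N + 4 : Nat) : Int) := by push_cast; ring
    rw [h, Int.toNat_natCast]
  have hg1 : g 1 = 1 := by rw [g_unfold 1 (by omega), g_zero]
  have hloop : loopA (N : Int) (3 * N * N + 4) ((1 : Nat) : Int) [] = [] ++ tailFrom N 0 := by
    have hfb : g N + 2 ≤ (3 * N * N + 4) + 1 := by linarith [g_le_sq N]
    have hi1 : 1 ≤ g (0 + 1) := by rw [show (0 : Nat) + 1 = 1 from rfl, hg1]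
    exact loop_main N (3 * N * N + 4) 0 1 [] hN (by rw [g_zero]; omega) hi1 rfl hfb
  have hloop' : loopA (N : Int) (3 * N * N + 4) (1 : Int) [] = [] ++ tailFrom N 0 := by
    have h1 : ((1 : Nat) : Int) = (1 : Int) := by norm_num
    rw [← h1]
    exact hloop
  have hlast : (tailFrom N 0).getLast? = some (chg (g N)) := tail_last N (N - 1) 0 (by omega)
  simp only [solution]
  rw [hfuel, hloop']
  rw [List.nil_append, PySem.List.pyGet?_neg_one, hlast]
  simp only [Option.getD_some]
  rw [fold_val (chg (g N)) (chg (g N)).length 0 1 (le_refl _)]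
  rw [List.take_length, val3_chg]
  ring

-- ===== VERDICT (by name: the statement is the Claim_ definition above) =====
theorem solution_spec : Claim_equal_solution := by
  intro n _ hpre
  unfold Pre_solution at hpre
  unfold Spec_solution
  have hn : n = ((n.toNat : Nat) : Int) := by omega
  rw [hn, solution_eq_gN n.toNat (by omega), alt_eq_g]

@[simp] theorem solution_raises : Claim_raises_solution := by
  unfold Claim_raises_solution
  refine ⟨?_, by decide, by decide, ?_⟩
  · intro n _ h
    unfold Raises_solution at h
    unfold Pre_solution
    omega
  · rw [show pvRaiseWitness_solution = (0 : Int) from rfl, solution_alt]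
    norm_num [pvRaiseWitnessOut_solution]
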